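-- pv_equiv track=rewrite | github.com/DOMIAXEGDE/cpy | generateGames.py | generate_possible_maneuvers
-- ===== SOURCE A (Python) =====
-- def generate_possible_maneuvers(n, start_pos, can_jump):
--     """Generate a dictionary of all possible maneuvers based on the board size and jumping rule."""
--     maneuvers = []
--     directions = [(-1, 0), (1, 0), (0, -1), (0, 1), (-1, -1), (-1, 1), (1, -1), (1, 1)]
--     x, y = start_pos
--
--     for direction in directions:
--         step = 1
--         while True:
--             new_x = x + direction[0] * step
--             new_y = y + direction[1] * step
--
--             # Check if the new position is within the board bounds
--             if 0 <= new_x < n and 0 <= new_y < n: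
--                 maneuvers.append((new_x, new_y))
--                 if not can_jump:
--                     break  # If the piece cannot jump, it can only move one step in each direction
--             else:
--                 break  # Stop if the move is out of bounds
--
--             step += 1
--
--     return maneuvers
-- ===== SOURCE B (Python) =====
-- def generate_possible_maneuvers(n, start_pos, can_jump):
--     """Closed-form: per direction intersect the per-axis in-bounds step intervals,
--     then emit steps 1..t_max (t_max clamped to 1 when the piece cannot jump)."""
--     x, y = start_pos
--     maneuvers = []
--     for dx, dy in [(-1, 0), (1, 0), (0, -1), (0, 1), (-1, -1), (-1, 1), (1, -1), (1, 1)]: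
--         lo, hi, ok = None, None, True
--         for c, d in ((x, dx), (y, dy)):
--             if d == 0:
--                 ok = ok and 0 <= c < n
--             else:
--                 a, b = (-c, n - 1 - c) if d == 1 else (c - n + 1, c)
--                 lo = a if lo is None else max(lo, a)
--                 hi = b if hi is None else min(hi, b)
--         if ok and lo <= 1 <= hi:
--             t = hi if can_jump else 1
--             maneuvers.extend((x + dx * s, y + dy * s) for s in range(1, t + 1))
--     return maneuvers
-- ===== Notes on version B (the rewrite author's own statement) =====
-- stated objective: alternative
-- what changed: Replaces A's step-by-step while loop per direction with a closed-form computation of the in-bounds step interval [lo, hi] (intersecting the two per-axis bounds) and a single range emission per direction.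
import Mathlib
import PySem

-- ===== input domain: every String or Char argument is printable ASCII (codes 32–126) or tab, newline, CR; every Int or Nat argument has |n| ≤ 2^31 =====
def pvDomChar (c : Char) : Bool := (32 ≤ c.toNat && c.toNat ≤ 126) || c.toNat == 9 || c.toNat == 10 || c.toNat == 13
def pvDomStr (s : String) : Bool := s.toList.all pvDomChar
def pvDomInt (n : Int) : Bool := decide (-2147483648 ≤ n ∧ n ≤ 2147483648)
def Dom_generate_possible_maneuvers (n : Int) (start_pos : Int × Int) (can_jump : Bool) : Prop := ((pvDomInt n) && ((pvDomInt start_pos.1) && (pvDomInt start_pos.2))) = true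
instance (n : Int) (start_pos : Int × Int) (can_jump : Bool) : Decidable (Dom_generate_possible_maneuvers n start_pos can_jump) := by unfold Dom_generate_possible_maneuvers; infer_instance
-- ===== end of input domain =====

-- B replaces A's step-by-step while loops with a closed-form per-direction step interval; objective: simpler/alternative.

-- ===== PORT A =====
-- A's inner `while True` loop; the fuel argument only makes the loop total
-- (the loop leaves the board after at most n.natAbs + x.natAbs + y.natAbs + 1 steps).
def pvWalk (n x y dx dy : Int) (can_jump : Bool) (step : Int) : Nat → List (Int × Int)
  | 0 => []
  | f + 1 =>
    let new_x := x + dx * step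
    let new_y := y + dy * step
    if 0 ≤ new_x ∧ new_x < n ∧ 0 ≤ new_y ∧ new_y < n then
      (new_x, new_y) :: (if can_jump then pvWalk n x y dx dy can_jump (step + 1) f else [])
    else []

def generate_possible_maneuvers (n : Int) (start_pos : Int × Int) (can_jump : Bool) : List (Int × Int) :=
  let x := start_pos.1
  let y := start_pos.2
  let fuel := n.natAbs + x.natAbs + y.natAbs + 2
  [((-1 : Int), (0 : Int)), (1, 0), (0, -1), (0, 1), (-1, -1), (-1, 1), (1, -1), (1, 1)].foldl
    (fun maneuvers d => maneuvers ++ pvWalk n x y d.1 d.2 can_jump 1 fuel) []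

-- ===== PORT B =====
-- B's inner loop over the two axes, accumulating (lo, hi, ok).
def pvAxis (n : Int) (st : Option Int × Option Int × Bool) (cd : Int × Int) : Option Int × Option Int × Bool :=
  let c := cd.1
  let d := cd.2
  let lo := st.1
  let hi := st.2.1
  let ok := st.2.2
  if d = 0 then (lo, hi, ok && decide (0 ≤ c ∧ c < n))
  else
    let a := if d = 1 then -c else c - n + 1
    let b := if d = 1 then n - 1 - c else c
    (some (match lo with | none => a | some l => max l a),
     some (match hi with | none => b | some h => min h b), ok)

def pvDir (n x y : Int) (can_jump : Bool) (maneuvers : List (Int × Int)) (dxy : Int × Int) : List (Int × Int) :=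
  let dx := dxy.1
  let dy := dxy.2
  match [(x, dx), (y, dy)].foldl (pvAxis n) (none, none, true) with
  | (some lo, some hi, ok) =>
    if ok && decide (lo ≤ 1 ∧ 1 ≤ hi) then
      maneuvers ++ (PySem.List.pyRange 1 ((if can_jump then hi else 1) + 1) 1).map
        (fun s => (x + dx * s, y + dy * s))
    else maneuvers
  | _ => maneuvers

def generate_possible_maneuvers_alt (n : Int) (start_pos : Int × Int) (can_jump : Bool) : List (Int × Int) :=
  let x := start_pos.1
  let y := start_pos.2
  [((-1 : Int), (0 : Int)), (1, 0), (0, -1), (0, 1), (-1, -1), (-1, 1), (1, -1), (1, 1)].foldl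
    (pvDir n x y can_jump) []

-- ===== PRECONDITION & SPEC =====
def Spec_generate_possible_maneuvers (n : Int) (start_pos : Int × Int) (can_jump : Bool) (out : List (Int × Int)) : Prop := out = generate_possible_maneuvers_alt n start_pos can_jump
instance (n : Int) (start_pos : Int × Int) (can_jump : Bool) (out : List (Int × Int)) : Decidable (Spec_generate_possible_maneuvers n start_pos can_jump out) := by unfold Spec_generate_possible_maneuvers; infer_instance

-- ===== CLAIM (what is proved, stated in full; the proofs are below) =====
def Claim_equal_generate_possible_maneuvers : Prop := ∀ (n : Int) (start_pos : Int × Int) (can_jump : Bool), Dom_generate_possible_maneuvers n start_pos can_jump → Spec_generate_possible_maneuvers n start_pos can_jump (generate_possible_maneuvers n start_pos can_jump)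

-- ===== LEMMAS AND PROOFS =====

-- A's walk from step s, when the in-bounds steps are exactly the interval [lo, hi] (and ok):
theorem pvWalk_char (n x y dx dy : Int) (cj : Bool) (lo hi : Int) (ok : Bool)
    (H : ∀ s : Int, (0 ≤ x + dx * s ∧ x + dx * s < n ∧ 0 ≤ y + dy * s ∧ y + dy * s < n) ↔
          (ok = true ∧ lo ≤ s ∧ s ≤ hi)) :
    ∀ (fuel : Nat) (s : Int), lo ≤ s → (hi + 1 - s).toNat < fuel →
      pvWalk n x y dx dy cj s fuel =
        if ok && decide (s ≤ hi) then
          (if cj then (PySem.List.pyRange s (hi + 1) 1).map (fun t => (x + dx * t, y + dy * t))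
           else [(x + dx * s, y + dy * s)])
        else [] := by
  intro fuel
  induction fuel with
  | zero => intro s _ hf; omega
  | succ f ih =>
    intro s hlo hf
    simp only [pvWalk]
    by_cases hin : 0 ≤ x + dx * s ∧ x + dx * s < n ∧ 0 ≤ y + dy * s ∧ y + dy * s < n
    · have hok := (H s).mp hin
      simp only [if_pos hin, hok.1, hok.2.2, decide_true, Bool.and_self, if_pos]
      cases cj with
      | false => simp
      | true =>
        have hrec := ih (s + 1) (by omega) (by omega)
        rw [hrec]
        by_cases hs1 : s + 1 ≤ hi
        · simp only [hok.1, hs1, decide_true, Bool.and_self, if_pos]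
          rw [PySem.List.pyRange_one_cons (by omega : s < hi + 1)]
          simp
        · simp only [hs1, decide_false, Bool.and_false, Bool.false_eq_true, if_false]
          have : PySem.List.pyRange s (hi + 1) 1 = [s] := by
            rw [PySem.List.pyRange_one_cons (by omega : s < hi + 1)]
            rw [show hi + 1 = s + 1 by omega]
            simp [PySem.List.pyRange]
          simp [this]
    · have : ¬ (ok = true ∧ lo ≤ s ∧ s ≤ hi) := fun h => hin ((H s).mpr h)
      have hc : (ok && decide (s ≤ hi)) = false := by
        by_cases hok : ok = true <;> simp_all
      simp [if_neg hin, hc]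

-- A's walk from step 1 is empty when step 1 is already out of bounds.
theorem pvWalk_one_empty (n x y dx dy : Int) (cj : Bool) (fuel : Nat)
    (h : ¬ (0 ≤ x + dx * 1 ∧ x + dx * 1 < n ∧ 0 ≤ y + dy * 1 ∧ y + dy * 1 < n)) :
    pvWalk n x y dx dy cj 1 fuel = [] := by
  cases fuel with
  | zero => rfl
  | succ f => simp only [pvWalk, if_neg h]

theorem append_ite_nil {α : Type} (c : Prop) [Decidable c] (acc r : List α) :
    acc ++ (if c then r else []) = if c then acc ++ r else acc := by
  split <;> simp

-- One direction: A's walk equals B's closed-form emission.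
theorem dir_eq (n x y dx dy : Int) (cj : Bool) (lo hi : Int) (ok : Bool)
    (H : ∀ s : Int, (0 ≤ x + dx * s ∧ x + dx * s < n ∧ 0 ≤ y + dy * s ∧ y + dy * s < n) ↔
          (ok = true ∧ lo ≤ s ∧ s ≤ hi))
    (fuel : Nat) (hf : hi.toNat < fuel) :
    pvWalk n x y dx dy cj 1 fuel =
      if ok && decide (lo ≤ 1 ∧ 1 ≤ hi) then
        (PySem.List.pyRange 1 ((if cj then hi else 1) + 1) 1).map
          (fun s => (x + dx * s, y + dy * s))
      else [] := by
  by_cases hc : ok = true ∧ lo ≤ 1 ∧ 1 ≤ hi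
  · obtain ⟨hok, hlo, hhi⟩ := hc
    rw [pvWalk_char n x y dx dy cj lo hi ok H fuel 1 hlo (by omega)]
    simp only [hok, hhi, hlo, decide_true, Bool.and_self, and_self, if_pos trivial]
    cases cj with
    | true => simp
    | false =>
      simp only [if_false, Bool.false_eq_true]
      rw [show (1 : Int) + 1 = 2 by norm_num]
      rfl
  · have hempty : pvWalk n x y dx dy cj 1 fuel = [] := by
      apply pvWalk_one_empty
      intro hin
      exact hc ⟨((H 1).mp hin).1, ((H 1).mp hin).2⟩
    rw [hempty]
    have hcf : (ok && decide (lo ≤ 1 ∧ 1 ≤ hi)) = false := by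
      by_cases hok : ok = true <;> simp_all
    rw [hcf]
    simp

-- ===== VERDICT (by name: the statement is the Claim_ definition above) =====
set_option maxHeartbeats 1000000 in
theorem generate_possible_maneuvers_spec : Claim_equal_generate_possible_maneuvers := by
  intro n start_pos cj _
  unfold Spec_generate_possible_maneuvers
  obtain ⟨x, y⟩ := start_pos
  unfold generate_possible_maneuvers generate_possible_maneuvers_alt
  apply PySem.List.foldl_congr_mem
  intro acc d hd
  simp only [List.mem_cons, List.not_mem_nil, or_false] at hd
  rcases hd with h | h | h | h | h | h | h | h <;> subst h <;>
    simp only [pvDir] <;> norm_num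
  · rw [dir_eq n x y (-1) 0 cj (x - n + 1) x (decide (0 ≤ y ∧ y < n))
        (by intro s; simp only [decide_eq_true_eq]; constructor <;> (intro h; refine ⟨?_, ?_⟩) <;> omega) _ (by omega),
      append_ite_nil]
    simp [pvAxis]
  · rw [dir_eq n x y 1 0 cj (-x) (n - 1 - x) (decide (0 ≤ y ∧ y < n))
        (by intro s; simp only [decide_eq_true_eq]; constructor <;> (intro h; refine ⟨?_, ?_⟩) <;> omega) _ (by omega),
      append_ite_nil]
    simp [pvAxis]
  · rw [dir_eq n x y 0 (-1) cj (y - n + 1) y (decide (0 ≤ x ∧ x < n))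
        (by intro s; simp only [decide_eq_true_eq]; constructor <;> (intro h; refine ⟨?_, ?_⟩) <;> omega) _ (by omega),
      append_ite_nil]
    simp [pvAxis]
  · rw [dir_eq n x y 0 1 cj (-y) (n - 1 - y) (decide (0 ≤ x ∧ x < n))
        (by intro s; simp only [decide_eq_true_eq]; constructor <;> (intro h; refine ⟨?_, ?_⟩) <;> omega) _ (by omega),
      append_ite_nil]
    simp [pvAxis]
  · rw [dir_eq n x y (-1) (-1) cj (max (x - n + 1) (y - n + 1)) (min x y) true
        (by intro s; simp only [true_and]; constructor <;> (intro h; refine ⟨?_, ?_⟩) <;> omega) _ (by omega),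
      append_ite_nil]
    simp [pvAxis]
  · rw [dir_eq n x y (-1) 1 cj (max (x - n + 1) (-y)) (min x (n - 1 - y)) true
        (by intro s; simp only [true_and]; constructor <;> (intro h; refine ⟨?_, ?_⟩) <;> omega) _ (by omega),
      append_ite_nil]
    simp [pvAxis]
  · rw [dir_eq n x y 1 (-1) cj (max (-x) (y - n + 1)) (min (n - 1 - x) y) true
        (by intro s; simp only [true_and]; constructor <;> (intro h; refine ⟨?_, ?_⟩) <;> omega) _ (by omega),
      append_ite_nil]
    simp [pvAxis]
  · rw [dir_eq n x y 1 1 cj (max (-x) (-y)) (min (n - 1 - x) (n - 1 - y)) true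
        (by intro s; simp only [true_and]; constructor <;> (intro h; refine ⟨?_, ?_⟩) <;> omega) _ (by omega),
      append_ite_nil]
    simp [pvAxis]
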